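-- pv_equiv track=rewrite | github.com/nhoclove9x/VideoLingo | core/_5_split_sub.py | _merge_text_parts
-- ===== SOURCE A (Python) =====
-- from typing import List, Tuple
--
-- def _merge_text_parts(parts: List[str]) -> str:
--     cleaned = [str(part).strip() for part in parts if str(part).strip()]
--     if not cleaned:
--         return ""
--
--     merged = cleaned[0]
--     for part in cleaned[1:]:
--         if part and part[0] in ",.;:!?%)]}":
--             merged += part
--         elif any(char.isspace() for char in merged) or any(char.isspace() for char in part):
--             merged = f"{merged} {part}".strip()
--         else:
--             merged += part
--     return merged.strip()
-- ===== SOURCE B (Python) =====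
-- def _merge_text_parts(parts):
--     cleaned = [str(part).strip() for part in parts if str(part).strip()]
--     if not cleaned:
--         return ""
--     # first index whose part contains whitespace; after it every non-punctuation
--     # part gets a single leading space (before it, parts are glued directly)
--     a = next((i for i, p in enumerate(cleaned)
--               if any(c.isspace() for c in p)), len(cleaned))
--     pieces = [cleaned[0]]
--     for i, p in enumerate(cleaned[1:], 1):
--         if p[0] in ",.;:!?%)]}" or i < a:
--             pieces.append(p)
--         else:
--             pieces.append(" " + p)
--     return "".join(pieces)
-- ===== Notes on version B (the rewrite author's own statement) =====
-- stated objective: faster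
-- what changed: A rescans the growing accumulator for whitespace (and re-strips it) on every iteration; B precomputes the single activation index (first cleaned part containing whitespace) and then emits each part in one join pass, gluing before that index and space-separating after it.
import Mathlib
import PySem

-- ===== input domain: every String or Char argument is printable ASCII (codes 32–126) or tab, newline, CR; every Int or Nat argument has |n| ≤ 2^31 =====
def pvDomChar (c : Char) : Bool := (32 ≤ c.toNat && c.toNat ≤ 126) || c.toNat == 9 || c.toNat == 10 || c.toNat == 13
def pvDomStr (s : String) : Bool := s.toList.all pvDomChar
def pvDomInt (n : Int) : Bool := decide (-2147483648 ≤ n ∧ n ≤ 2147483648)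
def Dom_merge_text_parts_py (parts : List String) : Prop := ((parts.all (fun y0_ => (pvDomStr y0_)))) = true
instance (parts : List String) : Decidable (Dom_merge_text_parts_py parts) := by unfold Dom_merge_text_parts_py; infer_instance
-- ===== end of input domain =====

-- B replaces A's rescans of the growing accumulator by one precomputed activation
-- index (first whitespace-containing part) plus a single join pass (objective: faster, measured).


-- ===== PORT A =====
-- ",.;:!?%)]}" (the punctuation constant both Pythons contain)
def pvPunct : List Char := [',', '.', ';', ':', '!', '?', '%', ')', ']', '}']

-- `part and part[0] in ",.;:!?%)]}"`: part[0] is a one-char string, `in` = substring test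
def pvStarts (part : List Char) : Bool :=
  match PySem.List.pyGet? part 0 with
  | some c => PySem.Chars.isIn [c] pvPunct
  | none => false

-- one iteration of A's loop body
def pvStepA (merged part : List Char) : List Char :=
  if !part.isEmpty && pvStarts part then merged ++ part
  else if merged.any PySem.Chars.isspace || part.any PySem.Chars.isspace then
    PySem.Chars.strip (merged ++ [' '] ++ part)
  else merged ++ part

def merge_text_parts_py (parts : List String) : String :=
  let cleaned := (parts.map (fun part => PySem.Chars.strip part.toList)).filter (fun s => !s.isEmpty)
  match cleaned with
  | [] => ""
  | m0 :: rest => String.ofList (PySem.Chars.strip (rest.foldl pvStepA m0))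

-- ===== PORT B =====
-- B's loop body: `p if (p[0] in punct or i < a) else " " + p`
def pvPieceB (a : Int) (ip : Int × List Char) : List Char :=
  if pvStarts ip.2 || ip.1 < a then ip.2 else ' ' :: ip.2

def merge_text_parts_py_alt (parts : List String) : String :=
  let cleaned := (parts.map (fun part => PySem.Chars.strip part.toList)).filter (fun s => !s.isEmpty)
  match cleaned with
  | [] => ""
  | m0 :: rest =>
    -- a = next((i for i, p in enumerate(cleaned) if any(c.isspace() for c in p)), len(cleaned))
    let a : Int := ((m0 :: rest).findIdx? (fun p => p.any PySem.Chars.isspace)).elim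
      (((m0 :: rest).length : Int)) (fun n => (n : Int))
    String.ofList (PySem.Chars.join []
      (m0 :: (PySem.List.enumerate rest 1).map (pvPieceB a)))

-- ===== PRECONDITION & SPEC =====
def Spec_merge_text_parts_py (parts : List String) (out : String) : Prop := out = merge_text_parts_py_alt parts
instance (parts : List String) (out : String) : Decidable (Spec_merge_text_parts_py parts out) := by unfold Spec_merge_text_parts_py; infer_instance

-- ===== CLAIM (what is proved, stated in full; the proofs are below) =====
def Claim_equal_merge_text_parts_py : Prop := ∀ (parts : List String), Dom_merge_text_parts_py parts → Spec_merge_text_parts_py parts (merge_text_parts_py parts)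

-- ===== LEMMAS AND PROOFS =====

-- "contains whitespace"
def pvWs (p : List Char) : Bool := p.any PySem.Chars.isspace

-- nonempty, no leading or trailing whitespace
def pvClean (cs : List Char) : Prop :=
  cs ≠ [] ∧ (∀ c, cs.head? = some c → PySem.Chars.isspace c = false)
         ∧ (∀ c, cs.getLast? = some c → PySem.Chars.isspace c = false)

-- A's loop rewritten with an explicit "whitespace seen" flag
def pvC : List (List Char) → Bool → List Char
  | [], _ => []
  | p :: ps, b =>
    (if pvStarts p then p else if b || pvWs p then ' ' :: p else p) ++ pvC ps (b || pvWs p)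

theorem pv_dropWhile_head? {p : Char → Bool} {l : List Char} {c : Char}
    (h : (l.dropWhile p).head? = some c) : p c = false := by
  induction l with
  | nil => simp at h
  | cons a t ih =>
    by_cases hp : p a
    · rw [List.dropWhile_cons_of_pos hp] at h; exact ih h
    · rw [List.dropWhile_cons_of_neg hp] at h
      simp only [List.head?_cons, Option.some.injEq] at h
      subst h; simpa using hp

theorem pv_dropWhile_eq_self {p : Char → Bool} {l : List Char} {c : Char}
    (h : l.head? = some c) (hp : p c = false) : l.dropWhile p = l := by
  cases l with
  | nil => rfl
  | cons a t =>
    simp only [List.head?_cons, Option.some.injEq] at h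
    subst h
    exact List.dropWhile_cons_of_neg (by simp [hp])

theorem pv_clean_strip (s : List Char) (h : PySem.Chars.strip s ≠ []) :
    pvClean (PySem.Chars.strip s) := by
  have hrev : (PySem.Chars.strip s).reverse
      = List.dropWhile PySem.Chars.isspace (PySem.Chars.lstrip s).reverse := by
    simp [PySem.Chars.strip, PySem.Chars.rstrip]
  refine ⟨h, ?_, ?_⟩
  · intro c hc
    have hpre : PySem.Chars.strip s <+: PySem.Chars.lstrip s := by
      rw [← List.reverse_suffix]
      rw [hrev]
      exact List.dropWhile_suffix _
    obtain ⟨t, ht⟩ := hpre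
    have hh : (PySem.Chars.lstrip s).head? = some c := by
      rw [← ht, List.head?_append_of_ne_nil _ h, hc]
    exact pv_dropWhile_head? (l := s) (by simpa [PySem.Chars.lstrip] using hh)
  · intro c hc
    rw [List.getLast?_eq_head?_reverse, hrev] at hc
    exact pv_dropWhile_head? hc

theorem pv_strip_eq_self {cs : List Char} (h : pvClean cs) : PySem.Chars.strip cs = cs := by
  obtain ⟨hne, hh, hl⟩ := h
  obtain ⟨c, hc⟩ : ∃ c, cs.head? = some c := by
    cases cs with
    | nil => exact absurd rfl hne
    | cons a t => exact ⟨a, rfl⟩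
  have h1 : PySem.Chars.lstrip cs = cs :=
    pv_dropWhile_eq_self hc (hh c hc)
  have hlast : cs.reverse.head? = some (cs.getLast hne) := by
    rw [← List.getLast?_eq_head?_reverse]
    exact List.getLast?_eq_some_getLast hne
  have h2 : List.dropWhile PySem.Chars.isspace cs.reverse = cs.reverse :=
    pv_dropWhile_eq_self hlast (hl _ (List.getLast?_eq_some_getLast hne))
  rw [PySem.Chars.strip, h1, PySem.Chars.rstrip, h2, List.reverse_reverse]

theorem pv_clean_append {m p : List Char} (hm : pvClean m) (hp : pvClean p) :
    pvClean (m ++ p) := by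
  refine ⟨by simp [hm.1], ?_, ?_⟩
  · intro c hc
    rw [List.head?_append_of_ne_nil _ hm.1] at hc
    exact hm.2.1 c hc
  · intro c hc
    rw [List.getLast?_append_of_ne_nil _ hp.1] at hc
    exact hp.2.2 c hc

theorem pv_clean_append_space {m p : List Char} (hm : pvClean m) (hp : pvClean p) :
    pvClean (m ++ ' ' :: p) := by
  refine ⟨by simp [hm.1], ?_, ?_⟩
  · intro c hc
    rw [List.head?_append_of_ne_nil _ hm.1] at hc
    exact hm.2.1 c hc
  · intro c hc
    rw [List.getLast?_append_of_ne_nil _ (by simp)] at hc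
    have : (' ' :: p).getLast? = p.getLast? := by
      have : ' ' :: p = [' '] ++ p := rfl
      rw [this, List.getLast?_append_of_ne_nil _ hp.1]
    rw [this] at hc
    exact hp.2.2 c hc

theorem pv_stepA_eq {m p : List Char} (hm : pvClean m) (hp : pvClean p) :
    pvStepA m p = m ++ (if pvStarts p then p else if pvWs m || pvWs p then ' ' :: p else p) := by
  have hne : p.isEmpty = false := by simp [hp.1]
  by_cases hs : pvStarts p = true
  · simp [pvStepA, hne, hs]
  · simp only [pvStepA, hne, Bool.not_false, Bool.true_and, hs, Bool.false_eq_true, if_false,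
      pvWs]
    by_cases hw : (m.any PySem.Chars.isspace || p.any PySem.Chars.isspace) = true
    · simp only [hw, if_true]
      have : m ++ [' '] ++ p = m ++ ' ' :: p := by simp
      rw [this, pv_strip_eq_self (pv_clean_append_space hm hp)]
    · simp [hw]

theorem pv_clean_stepA {m p : List Char} (hm : pvClean m) (hp : pvClean p) :
    pvClean (pvStepA m p) := by
  rw [pv_stepA_eq hm hp]
  split_ifs
  · exact pv_clean_append hm hp
  · exact pv_clean_append_space hm hp
  · exact pv_clean_append hm hp

theorem pv_ws_stepA {m p : List Char} (hm : pvClean m) (hp : pvClean p) :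
    pvWs (pvStepA m p) = (pvWs m || pvWs p) := by
  have hsp : PySem.Chars.isspace ' ' = true := by decide
  rw [pv_stepA_eq hm hp]
  split_ifs with h1 h2
  · simp [pvWs, List.any_append]
  · simp only [pvWs, List.any_append, List.any_cons, hsp, Bool.true_or, Bool.or_true]
    exact h2.symm
  · simp [pvWs, List.any_append]

theorem pv_foldl_eq (ps : List (List Char)) : ∀ (m : List Char), pvClean m →
    (∀ p ∈ ps, pvClean p) →
    ps.foldl pvStepA m = m ++ pvC ps (pvWs m) ∧ pvClean (ps.foldl pvStepA m) := by
  induction ps with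
  | nil => intro m hm _; simpa [pvC] using hm
  | cons p ps ih =>
    intro m hm hall
    have hp : pvClean p := hall p (by simp)
    have hall' : ∀ q ∈ ps, pvClean q := fun q hq => hall q (by simp [hq])
    obtain ⟨ih1, ih2⟩ := ih (pvStepA m p) (pv_clean_stepA hm hp) hall'
    refine ⟨?_, by simpa using ih2⟩
    calc (p :: ps).foldl pvStepA m = ps.foldl pvStepA (pvStepA m p) := rfl
      _ = pvStepA m p ++ pvC ps (pvWs (pvStepA m p)) := ih1
      _ = m ++ pvC (p :: ps) (pvWs m) := by
          rw [pv_ws_stepA hm hp, pv_stepA_eq hm hp, pvC, List.append_assoc]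

theorem pv_findIdx_elim (L : List (List Char)) (pr : List Char → Bool) :
    ((L.findIdx? pr).elim ((L.length : Int)) (fun n => (n : Int))) = ((L.findIdx pr : Nat) : Int) := by
  cases h : L.findIdx? pr with
  | none =>
    have := List.findIdx?_eq_none_iff.1 h
    have hlen : L.findIdx pr = L.length := List.findIdx_eq_length.2 this
    simp [hlen]
  | some k =>
    have := (List.findIdx?_eq_some_iff_findIdx_eq).1 h
    simp [this.2]

theorem pv_take_any (pr : List Char → Bool) (L : List (List Char)) :
    ∀ n : Nat, n < L.length → ((L.take (n + 1)).any pr = decide (L.findIdx pr ≤ n)) := by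
  induction L with
  | nil => intro n hn; simp at hn
  | cons x t ih =>
    intro n hn
    cases n with
    | zero =>
      cases hpr : pr x <;> simp [List.findIdx_cons, hpr]
    | succ k =>
      have hk : k < t.length := by simpa using hn
      cases hpr : pr x with
      | true => simp [List.take_succ_cons, List.findIdx_cons, hpr]
      | false =>
        rw [List.take_succ_cons, List.any_cons, hpr, Bool.false_or, ih k hk,
          List.findIdx_cons, hpr]
        simp only [cond_false]
        exact decide_eq_decide.2 (by omega)

theorem pv_enumerate_cons {α : Type} (x : α) (xs : List α) (s : Int) :
    PySem.List.enumerate (x :: xs) s = (s, x) :: PySem.List.enumerate xs (s + 1) := rfl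

theorem pv_join_nil_flatten (xs : List (List Char)) : PySem.Chars.join [] xs = xs.flatten := by
  induction xs with
  | nil => simp [PySem.Chars.join_nil]
  | cons x t ih =>
    cases t with
    | nil => simp [PySem.Chars.join_singleton]
    | cons y s => rw [PySem.Chars.join_cons_cons, ih]; simp

theorem pv_C_eq (L : List (List Char)) :
    ∀ (ps : List (List Char)) (i : Nat) (b : Bool), L.drop (i + 1) = ps →
    b = (L.take (i + 1)).any pvWs →
    pvC ps b = ((PySem.List.enumerate ps ((i : Int) + 1)).map
        (pvPieceB ((L.findIdx pvWs : Nat) : Int))).flatten := by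
  intro ps
  induction ps with
  | nil => intro i b _ _; simp [pvC]
  | cons p ps ih =>
    intro i b hdrop hb
    have hj : i + 1 < L.length := by
      have := congrArg List.length hdrop
      simp only [List.length_drop, List.length_cons] at this
      omega
    have hgetp : L[i + 1]? = some p := by
      have h0 : (L.drop (i + 1))[0]? = some p := by rw [hdrop]; rfl
      rwa [List.getElem?_drop, Nat.add_zero] at h0
    have htake : L.take (i + 2) = L.take (i + 1) ++ [p] := by
      rw [show i + 2 = (i + 1) + 1 from rfl, List.take_add_one, hgetp]; rfl
    have hdrop' : L.drop (i + 2) = ps := by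
      rw [show i + 2 = (i + 1) + 1 from rfl, ← List.drop_drop, hdrop]; rfl
    have hb' : (b || pvWs p) = (L.take (i + 2)).any pvWs := by
      rw [htake, List.any_append, hb]; simp
    have hkey : (b || pvWs p) = decide (L.findIdx pvWs ≤ i + 1) := by
      rw [hb']
      exact pv_take_any pvWs L (i + 1) hj
    have hcast : ((i : Int) + 1) = (((i + 1 : Nat) : Int)) := by push_cast; ring
    rw [pv_enumerate_cons, List.map_cons, List.flatten_cons, pvC]
    have hrest : pvC ps (b || pvWs p)
        = ((PySem.List.enumerate ps (((i + 1 : Nat) : Int) + 1)).map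
            (pvPieceB ((L.findIdx pvWs : Nat) : Int))).flatten := by
      exact ih (i + 1) (b || pvWs p) hdrop' hb'
    rw [hcast, hrest]
    congr 1
    -- the head piece
    by_cases hs : pvStarts p = true
    · simp [pvPieceB, hs]
    · by_cases hF : L.findIdx pvWs ≤ i + 1
      · have hb2 : (b || pvWs p) = true := by rw [hkey]; simp [hF]
        have hlt : ¬ (((i + 1 : Nat) : Int) < ((L.findIdx pvWs : Nat) : Int)) := by
          push_cast; omega
        simp only [pvPieceB, hs, Bool.false_eq_true, if_false, hb2, if_true, Bool.false_or]
        rw [if_neg (by simpa using hlt)]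
      · have hb2 : (b || pvWs p) = false := by rw [hkey]; simp [hF]
        have hlt : (((i + 1 : Nat) : Int) < ((L.findIdx pvWs : Nat) : Int)) := by
          push_cast; omega
        simp only [pvPieceB, hs, Bool.false_eq_true, if_false, hb2, Bool.false_or]
        rw [if_pos (by simpa using hlt)]

-- ===== VERDICT (by name: the statement is the Claim_ definition above) =====
theorem merge_text_parts_py_spec : Claim_equal_merge_text_parts_py := by
  intro parts _
  unfold Spec_merge_text_parts_py merge_text_parts_py merge_text_parts_py_alt
  cases hcl : (parts.map (fun part => PySem.Chars.strip part.toList)).filter (fun s => !s.isEmpty) with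
  | nil => simp
  | cons m0 rest =>
    show String.ofList (PySem.Chars.strip (rest.foldl pvStepA m0))
      = String.ofList (PySem.Chars.join [] (m0 :: (PySem.List.enumerate rest 1).map
          (pvPieceB (((m0 :: rest).findIdx? (fun p => p.any PySem.Chars.isspace)).elim
            (((m0 :: rest).length : Int)) (fun n => (n : Int))))))
    have hclall : ∀ p ∈ m0 :: rest, pvClean p := by
      intro p hp
      rw [← hcl] at hp
      have hmem := List.mem_filter.1 hp
      obtain ⟨q, hq, rfl⟩ := List.mem_map.1 hmem.1
      exact pv_clean_strip _ (by simpa using hmem.2)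
    have hm0 : pvClean m0 := hclall m0 (by simp)
    obtain ⟨hfold, hcleanf⟩ :=
      pv_foldl_eq rest m0 hm0 (fun p hp => hclall p (by simp [hp]))
    have hws : (fun p : List Char => p.any PySem.Chars.isspace) = pvWs := rfl
    rw [hws, pv_findIdx_elim, pv_join_nil_flatten, List.flatten_cons]
    rw [pv_strip_eq_self hcleanf, hfold]
    have hC := pv_C_eq (m0 :: rest) rest 0 (pvWs m0) (by simp) (by simp [pvWs])
    rw [hC]
    norm_num
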